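-- pv_equiv track=rewrite | github.com/AgentT30/InfyTq-Foundation_Courses | Programming Funcamentals Using Python/Day 4/flight_ticket.py | generate_ticket
-- ===== SOURCE A (Python) =====
-- def generate_ticket(airline, source, destination, no_of_passengers):
--     ticket_number_list = []
--     # Write your logic here
--     number = 101
--     for i in range(no_of_passengers):
--         ticket_number = f'{airline}:{source[:3]}:{destination[:3]}:{number}'
--         number += 1
--         ticket_number_list.append(ticket_number)
--
--     if len(ticket_number_list) < 5:
--         return ticket_number_list
--     else:
--         return ticket_number_list[-5:]
-- ===== SOURCE B (Python) =====
-- def generate_ticket(airline, source, destination, no_of_passengers):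
--     prefix = f'{airline}:{source[:3]}:{destination[:3]}:'
--     start = 101 + max(0, no_of_passengers - 5)
--     return [prefix + str(k) for k in range(start, 101 + no_of_passengers)]
-- ===== Notes on version B (the rewrite author's own statement) =====
-- stated objective: faster
-- what changed: Instead of building all n ticket strings and slicing the last five, B computes the starting ticket number arithmetically (101 + max(0, n-5)) and builds only the final min(5, n) strings.
import Mathlib
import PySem

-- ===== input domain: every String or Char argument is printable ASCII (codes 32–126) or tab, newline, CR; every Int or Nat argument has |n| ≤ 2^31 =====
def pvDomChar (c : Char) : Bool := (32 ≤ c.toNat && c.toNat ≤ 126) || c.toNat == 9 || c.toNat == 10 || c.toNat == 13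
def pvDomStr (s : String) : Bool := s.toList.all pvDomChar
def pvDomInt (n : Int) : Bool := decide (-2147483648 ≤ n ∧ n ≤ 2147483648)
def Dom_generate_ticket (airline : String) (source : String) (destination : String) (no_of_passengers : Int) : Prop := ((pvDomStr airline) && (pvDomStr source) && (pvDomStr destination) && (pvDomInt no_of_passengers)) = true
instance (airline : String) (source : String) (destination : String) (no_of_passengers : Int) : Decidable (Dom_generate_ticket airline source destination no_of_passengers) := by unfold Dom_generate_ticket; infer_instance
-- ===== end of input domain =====

-- B replaces A's build-all-n-tickets-then-slice loop by direct arithmetic: it starts at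
-- 101 + max(0, n-5) and builds only the final min(5, n) ticket strings (objective: faster).

-- ===== PORT A =====
def generate_ticket (airline : String) (source : String) (destination : String) (no_of_passengers : Int) : List String :=
  let st := (PySem.List.pyRange 0 no_of_passengers 1).foldl
    (fun (st : Int × List String) _ =>
      let ticket := String.ofList (airline.toList ++ ':' ::
        PySem.Chars.slice source.toList none (some 3) ++ ':' ::
        PySem.Chars.slice destination.toList none (some 3) ++ ':' ::
        PySem.Int.toChars st.1)
      (st.1 + 1, st.2 ++ [ticket])) (101, [])
  if (st.2.length : Int) < 5 then st.2
  else PySem.List.slice st.2 (some (-5)) none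

-- ===== PORT B =====
def generate_ticket_alt (airline : String) (source : String) (destination : String) (no_of_passengers : Int) : List String :=
  let pre := (airline.toList ++ ':' ::
      PySem.Chars.slice source.toList none (some 3) ++ ':' ::
      PySem.Chars.slice destination.toList none (some 3)) ++ [':']
  let start := 101 + max 0 (no_of_passengers - 5)
  (PySem.List.pyRange start (101 + no_of_passengers) 1).map
    (fun k => String.ofList (pre ++ PySem.Int.toChars k))

-- ===== PRECONDITION & SPEC =====
def Spec_generate_ticket (airline : String) (source : String) (destination : String) (no_of_passengers : Int) (out : List String) : Prop := out = generate_ticket_alt airline source destination no_of_passengers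
instance (airline : String) (source : String) (destination : String) (no_of_passengers : Int) (out : List String) : Decidable (Spec_generate_ticket airline source destination no_of_passengers out) := by unfold Spec_generate_ticket; infer_instance

-- ===== CLAIM (what is proved, stated in full; the proofs are below) =====
def Claim_equal_generate_ticket : Prop := ∀ (airline : String) (source : String) (destination : String) (no_of_passengers : Int), Dom_generate_ticket airline source destination no_of_passengers → Spec_generate_ticket airline source destination no_of_passengers (generate_ticket airline source destination no_of_passengers)

-- ===== LEMMAS AND PROOFS =====

-- The ticket string A formats for number m (proof abbreviation).
def pvTk (airline source destination : String) (m : Int) : String :=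
  String.ofList (airline.toList ++ ':' ::
    PySem.Chars.slice source.toList none (some 3) ++ ':' ::
    PySem.Chars.slice destination.toList none (some 3) ++ ':' ::
    PySem.Int.toChars m)

-- A's loop, run over any list, appends tickets numbered m, m+1, … to the accumulator.
theorem pv_loopA (airline source destination : String) (l : List Int) (m : Int) (acc : List String) :
    l.foldl (fun (st : Int × List String) _ =>
        (st.1 + 1, st.2 ++ [pvTk airline source destination st.1])) (m, acc)
      = (m + l.length, acc ++ (PySem.List.pyRange m (m + l.length) 1).map (pvTk airline source destination)) := by
  induction l generalizing m acc with
  | nil => simp [PySem.List.pyRange_one_eq_nil]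
  | cons x t ih =>
    simp only [List.foldl_cons, List.length_cons]
    rw [ih (m + 1) (acc ++ [pvTk airline source destination m])]
    rw [PySem.List.pyRange_one_cons (show m < m + (((t.length + 1 : Nat)) : Int) by push_cast; omega)]
    rw [show m + (((t.length + 1 : Nat)) : Int) = m + 1 + (t.length : Int) by push_cast; ring]
    simp [List.append_assoc]

theorem generate_ticket_spec : Claim_equal_generate_ticket := by
  intro airline source destination n _
  unfold Spec_generate_ticket generate_ticket generate_ticket_alt
  show (if _ then _ else _) = _
  rw [show (fun (st : Int × List String) (_ : Int) =>
        (st.1 + 1, st.2 ++ [String.ofList (airline.toList ++ ':' ::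
          PySem.Chars.slice source.toList none (some 3) ++ ':' ::
          PySem.Chars.slice destination.toList none (some 3) ++ ':' ::
          PySem.Int.toChars st.1)]))
      = (fun (st : Int × List String) (_ : Int) =>
        (st.1 + 1, st.2 ++ [pvTk airline source destination st.1])) from rfl]
  rw [pv_loopA, PySem.List.length_pyRange_one]
  have hfun : (fun k => String.ofList ((airline.toList ++ ':' ::
        PySem.Chars.slice source.toList none (some 3) ++ ':' ::
        PySem.Chars.slice destination.toList none (some 3)) ++ [':'] ++ PySem.Int.toChars k))
      = pvTk airline source destination := by
    funext k; simp [pvTk]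
  simp only [hfun]
  by_cases hn : 0 ≤ n
  · rw [show (101 : Int) + ((n - 0).toNat : Int) = 101 + n from by omega]
    have hlen : ((PySem.List.pyRange (101 : Int) (101 + n) 1).map (pvTk airline source destination)).length = n.toNat := by
      simp [PySem.List.length_pyRange_one]
    by_cases h5 : n < 5
    · rw [if_pos (by simp only [List.nil_append, hlen]; omega)]
      rw [show max 0 (n - 5) = 0 from by omega]
      simp
    · rw [if_neg (by simp only [List.nil_append, hlen]; omega)]
      rw [List.nil_append, PySem.List.slice_from_neg_ofNat _ 5 (by omega), hlen]
      rw [show max 0 (n - 5) = n - 5 from by omega]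
      rw [PySem.List.pyRange_one_append 101 (101 + (n - 5)) (101 + n) (by omega) (by omega)]
      rw [List.map_append]
      rw [List.drop_left' (by simp [PySem.List.length_pyRange_one]; omega)]
  · -- no passengers: both sides are empty
    rw [show (n - 0).toNat = 0 from by omega]
    simp [PySem.List.pyRange_one_eq_nil (show (101:Int) + n ≤ 101 + max 0 (n - 5) by omega)]
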